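-- pv_equiv track=rewrite | github.com/StephyBless/Smart-Surveillance-on-Vehicle-Detection | advanced_ocr.py | _apply_character_corrections
-- ===== SOURCE A (Python) =====
-- def _apply_character_corrections(text: str) -> str:
--     """
--     Apply intelligent character corrections
--     """
--     corrected = text
--
--     # Context-based corrections
--     # If character at start/end is digit-like, prefer letter
--     # If character in middle is letter-like, prefer digit
--
--     result = list(corrected)
--
--     for i, char in enumerate(result):
--         # Position-based heuristics
--         if i < 2 or i >= len(result) - 2:
--             # Likely letters at start/end
--             if char in ['0', '1', '5', '8']:
--                 if char == '0':
--                     result[i] = 'O'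
--                 elif char == '1':
--                     result[i] = 'I'
--                 elif char == '5':
--                     result[i] = 'S'
--                 elif char == '8':
--                     result[i] = 'B'
--         else:
--             # Likely numbers in middle
--             if char in ['O', 'I', 'S', 'B']:
--                 if char == 'O':
--                     result[i] = '0'
--                 elif char == 'I':
--                     result[i] = '1'
--                 elif char == 'S':
--                     result[i] = '5'
--                 elif char == 'B':
--                     result[i] = '8'
--
--     return ''.join(result)
-- ===== SOURCE B (Python) =====
-- _EDGE = str.maketrans('0158', 'OISB')
-- _MID = str.maketrans('OISB', '0158')
--
--
-- def _apply_character_corrections(text: str) -> str: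
--     # Region slicing + translation tables instead of a per-index loop.
--     if len(text) <= 4:
--         return text.translate(_EDGE)
--     return (text[:2].translate(_EDGE)
--             + text[2:-2].translate(_MID)
--             + text[-2:].translate(_EDGE))
-- ===== Notes on version B (the rewrite author's own statement) =====
-- stated objective: idiomatic
-- what changed: Replaces the per-index loop with position branches by slicing the string into head/middle/tail regions and applying two str.maketrans translation tables.
import Mathlib
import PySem

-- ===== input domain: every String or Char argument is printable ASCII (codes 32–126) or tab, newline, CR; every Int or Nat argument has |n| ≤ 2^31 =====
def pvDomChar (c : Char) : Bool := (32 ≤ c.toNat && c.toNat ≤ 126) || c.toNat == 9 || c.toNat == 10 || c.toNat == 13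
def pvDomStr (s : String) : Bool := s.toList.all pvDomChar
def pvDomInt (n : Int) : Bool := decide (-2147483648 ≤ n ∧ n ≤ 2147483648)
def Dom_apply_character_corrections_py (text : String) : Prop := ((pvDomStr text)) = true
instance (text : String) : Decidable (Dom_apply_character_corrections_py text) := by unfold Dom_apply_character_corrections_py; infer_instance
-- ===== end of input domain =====

-- B swaps A's per-index loop (position branch at every character) for region slicing
-- (head/middle/tail) with two translation maps; same output, more idiomatic.

-- ===== PORT A =====
-- A's loop body: at each (char, index) pair, position-based branch, two if-chains.
def pvFixA (n : Nat) (p : Char × Nat) : Char :=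
  let char := p.1
  let i := p.2
  if i < 2 ∨ n - 2 ≤ i then
    if char = '0' ∨ char = '1' ∨ char = '5' ∨ char = '8' then
      if char = '0' then 'O'
      else if char = '1' then 'I'
      else if char = '5' then 'S'
      else if char = '8' then 'B'
      else char
    else char
  else
    if char = 'O' ∨ char = 'I' ∨ char = 'S' ∨ char = 'B' then
      if char = 'O' then '0'
      else if char = 'I' then '1'
      else if char = 'S' then '5'
      else if char = 'B' then '8'
      else char
    else char

def apply_character_corrections_py (text : String) : String :=
  let result := text.toList
  String.ofList ((result.zipIdx).map (pvFixA result.length))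

-- ===== PORT B =====
-- edge translation table {'0':'O','1':'I','5':'S','8':'B'}
def pvEdge (c : Char) : Char :=
  if c = '0' then 'O' else if c = '1' then 'I' else if c = '5' then 'S'
  else if c = '8' then 'B' else c

-- middle translation table {'O':'0','I':'1','S':'5','B':'8'}
def pvMid (c : Char) : Char :=
  if c = 'O' then '0' else if c = 'I' then '1' else if c = 'S' then '5'
  else if c = 'B' then '8' else c

def apply_character_corrections_py_alt (text : String) : String :=
  let l := text.toList
  if l.length ≤ 4 then String.ofList (l.map pvEdge)
  else
    String.ofList ((PySem.List.slice l none (some 2)).map pvEdge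
      ++ (PySem.List.slice l (some 2) (some (-2))).map pvMid
      ++ (PySem.List.slice l (some (-2)) none).map pvEdge)

-- ===== PRECONDITION & SPEC =====
def Spec_apply_character_corrections_py (text : String) (out : String) : Prop := out = apply_character_corrections_py_alt text
instance (text : String) (out : String) : Decidable (Spec_apply_character_corrections_py text out) := by unfold Spec_apply_character_corrections_py; infer_instance

-- ===== CLAIM (what is proved, stated in full; the proofs are below) =====
def Claim_equal_apply_character_corrections_py : Prop := ∀ (text : String), Dom_apply_character_corrections_py text → Spec_apply_character_corrections_py text (apply_character_corrections_py text)

-- ===== LEMMAS AND PROOFS =====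
lemma pvFixA_edge (n : Nat) (c : Char) (i : Nat) (h : i < 2 ∨ n - 2 ≤ i) :
    pvFixA n (c, i) = pvEdge c := by
  simp only [pvFixA, pvEdge, if_pos h]
  split_ifs <;> simp_all

lemma pvFixA_mid (n : Nat) (c : Char) (i : Nat) (h : ¬(i < 2 ∨ n - 2 ≤ i)) :
    pvFixA n (c, i) = pvMid c := by
  simp only [pvFixA, pvMid, if_neg h]
  split_ifs <;> simp_all

theorem apply_character_corrections_py_spec : Claim_equal_apply_character_corrections_py := by
  intro text _
  show apply_character_corrections_py text = apply_character_corrections_py_alt text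
  unfold apply_character_corrections_py apply_character_corrections_py_alt
  set l := text.toList with hl
  by_cases h4 : l.length ≤ 4
  · simp only [if_pos h4]
    congr 1
    apply List.ext_getElem (by simp)
    intro i hi hi'
    have hi0 : i < l.length := by simpa using hi'
    simp only [List.getElem_map, List.getElem_zipIdx]
    rw [pvFixA_edge]
    omega
  · simp only [if_neg h4]
    have he : PySem.List.slice l none (some 2) = l.take 2 := by
      rw [PySem.List.slice_to l (by norm_num)]
      simp
    have hm : PySem.List.slice l (some 2) (some (-2)) = (l.drop 2).take (l.length - 4) := by
      simp [PySem.List.slice, Nat.min_eq_left (show 2 ≤ l.length by omega)]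
      omega
    rw [he, hm, PySem.List.slice_from_neg_ofNat l 2 (by norm_num)]
    refine congrArg String.ofList ?_
    apply List.ext_getElem (by simp; omega)
    intro i hi hi'
    have hn : 4 < l.length := by omega
    have hi0 : i < l.length := by simpa using hi
    simp only [List.getElem_map, List.getElem_zipIdx, Nat.zero_add, List.getElem_append,
      List.length_append, List.length_map, List.length_take, List.length_drop,
      List.getElem_take, List.getElem_drop]
    split_ifs with h1 h2
    · have h1' : i < 2 := by omega
      rw [pvFixA_edge _ _ _ (Or.inl h1')]
    · rw [pvFixA_mid _ _ _ (by omega)]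
      congr 2
      omega
    · rw [pvFixA_edge _ _ _ (Or.inr (by omega))]
      congr 2
      omega
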